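-- pv_equiv track=rewrite | github.com/ChuckySRB/Buckit-adds | generate_video_v6.py | _colored_segments
-- ===== SOURCE A (Python) =====
-- def _colored_segments(visible, highlights, text_color, highlight_color):
--     """Split visible text into (text, color) segments."""
--     if not highlights or not visible:
--         return [(visible, text_color)]
--     colors = [text_color] * len(visible)
--     for s, e in highlights:
--         for i in range(max(0, s), min(e, len(visible))):
--             colors[i] = highlight_color
--     segs, i = [], 0
--     while i < len(visible):
--         c = colors[i]
--         j = i + 1
--         while j < len(visible) and colors[j] == c:
--             j += 1
--         segs.append((visible[i:j], c))
--         i = j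
--     return segs
-- ===== SOURCE B (Python) =====
-- def _colored_segments(visible, highlights, text_color, highlight_color):
--     """Split visible text into (text, color) segments (difference-array version)."""
--     if not visible:
--         return [(visible, text_color)]
--     n = len(visible)
--     diff = [0] * (n + 1)
--     for s, e in highlights:
--         lo, hi = max(0, s), min(e, n)
--         if lo < hi:
--             diff[lo] += 1
--             diff[hi] -= 1
--     segs = []
--     depth = 0
--     buf = []
--     cur = text_color
--     for i, ch in enumerate(visible):
--         depth += diff[i]
--         c = highlight_color if depth > 0 else text_color
--         if c != cur and buf:
--             segs.append(("".join(buf), cur))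
--             buf = []
--         cur = c
--         buf.append(ch)
--     segs.append(("".join(buf), cur))
--     return segs
-- ===== Notes on version B (the rewrite author's own statement) =====
-- stated objective: alternative
-- what changed: Replaces the per-range per-character marking loop by a +1/-1 difference array with a running prefix sum, and builds the segments in that same single pass with a run buffer instead of a separate nested while-loop scan.
import Mathlib
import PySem

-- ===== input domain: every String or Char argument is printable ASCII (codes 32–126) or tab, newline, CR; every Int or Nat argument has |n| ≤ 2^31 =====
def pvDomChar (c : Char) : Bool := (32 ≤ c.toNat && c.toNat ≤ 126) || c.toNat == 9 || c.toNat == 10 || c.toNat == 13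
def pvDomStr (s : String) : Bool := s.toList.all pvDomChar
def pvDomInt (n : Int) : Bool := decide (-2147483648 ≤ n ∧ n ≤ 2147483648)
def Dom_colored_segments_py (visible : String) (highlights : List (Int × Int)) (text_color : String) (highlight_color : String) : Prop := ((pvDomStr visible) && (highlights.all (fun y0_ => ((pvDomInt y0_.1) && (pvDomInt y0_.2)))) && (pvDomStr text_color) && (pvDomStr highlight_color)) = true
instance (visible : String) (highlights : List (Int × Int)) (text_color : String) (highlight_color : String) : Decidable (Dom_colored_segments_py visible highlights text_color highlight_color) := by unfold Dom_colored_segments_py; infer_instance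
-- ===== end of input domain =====

-- B replaces A's per-range per-character marking by a +1/-1 difference array with a running
-- prefix sum, and builds the segments in that same single pass (objective: alternative algorithm).

-- ===== PORT A =====
-- the marking loop body: `for i in range(max(0, s), min(e, len(visible))): colors[i] = highlight_color`
def pvMark (hc : String) (n : Int) (cs : List String) (p : Int × Int) : List String :=
  (PySem.List.pyRange (max 0 p.1) (min p.2 n) 1).foldl (fun cs i => cs.set i.toNat hc) cs

-- inner `while j < len(visible) and colors[j] == c: j += 1`
def pvAInner (nv : Nat) (colors : List String) (c : String) (j : Nat) : Nat :=
  if h : j < nv ∧ PySem.List.pyGetD colors (j : Int) "" = c then pvAInner nv colors c (j + 1) else j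
termination_by nv - j
decreasing_by omega

-- the recursive call happens at a larger index (needed for pvAOuter's termination)
theorem pvAInner_ge (nv : Nat) (colors : List String) (c : String) (j : Nat) :
    j ≤ pvAInner nv colors c j := by
  fun_induction pvAInner nv colors c j with
  | case1 j h ih => omega
  | case2 j h => exact Nat.le_refl j

-- outer `while i < len(visible)` loop; `visible[i:j]` is PySem.List.slice on the char list
def pvAOuter (vs : List Char) (colors : List String) (i : Nat) : List (String × String) :=
  if h : i < vs.length then
    let c := PySem.List.pyGetD colors (i : Int) ""
    let j := pvAInner vs.length colors c (i + 1)
    (String.ofList (PySem.List.slice vs (some (i : Int)) (some (j : Int))), c) :: pvAOuter vs colors j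
  else []
termination_by vs.length - i
decreasing_by
  have := pvAInner_ge vs.length colors (PySem.List.pyGetD colors (i : Int) "") (i + 1); omega

def colored_segments_py (visible : String) (highlights : List (Int × Int)) (text_color : String) (highlight_color : String) : List (String × String) :=
  if highlights = [] ∨ visible = "" then [(visible, text_color)]
  else
    pvAOuter visible.toList
      (highlights.foldl (pvMark highlight_color (visible.toList.length : Int))
        (List.replicate visible.toList.length text_color)) 0

-- ===== PORT B =====
-- `diff[k] += v`
def pvIncAt (d : List Int) (k : Nat) (v : Int) : List Int := d.set k (d.getD k 0 + v)

-- loop body of `for s, e in highlights: lo, hi = max(0,s), min(e,n); if lo < hi: diff[lo] += 1; diff[hi] -= 1`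
def pvDiffOf (n : Int) (d : List Int) (p : Int × Int) : List Int :=
  if max 0 p.1 < min p.2 n then pvIncAt (pvIncAt d (max 0 p.1).toNat 1) (min p.2 n).toNat (-1) else d

-- loop body of the single `for i, ch in enumerate(visible)` pass; state = (segs, depth, buf, cur)
def pvBStep (diff : List Int) (tc hc : String)
    (st : List (String × String) × Int × List Char × String) (ic : Int × Char) :
    List (String × String) × Int × List Char × String :=
  let depth := st.2.1 + PySem.List.pyGetD diff ic.1 0
  let c := if depth > 0 then hc else tc
  if c ≠ st.2.2.2 ∧ st.2.2.1 ≠ [] then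
    (st.1 ++ [(String.ofList st.2.2.1, st.2.2.2)], depth, [ic.2], c)
  else
    (st.1, depth, st.2.2.1 ++ [ic.2], c)

def colored_segments_py_alt (visible : String) (highlights : List (Int × Int)) (text_color : String) (highlight_color : String) : List (String × String) :=
  if visible = "" then [(visible, text_color)]
  else
    let vs := visible.toList
    let st := (PySem.List.enumerate vs 0).foldl
      (pvBStep (highlights.foldl (pvDiffOf (vs.length : Int)) (List.replicate (vs.length + 1) (0 : Int)))
        text_color highlight_color)
      ([], 0, [], text_color)
    st.1 ++ [(String.ofList st.2.2.1, st.2.2.2)]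

-- ===== PRECONDITION & SPEC =====
def Spec_colored_segments_py (visible : String) (highlights : List (Int × Int)) (text_color : String) (highlight_color : String) (out : List (String × String)) : Prop := out = colored_segments_py_alt visible highlights text_color highlight_color
instance (visible : String) (highlights : List (Int × Int)) (text_color : String) (highlight_color : String) (out : List (String × String)) : Decidable (Spec_colored_segments_py visible highlights text_color highlight_color out) := by unfold Spec_colored_segments_py; infer_instance

-- ===== CLAIM (what is proved, stated in full; the proofs are below) =====
def Claim_equal_colored_segments_py : Prop := ∀ (visible : String) (highlights : List (Int × Int)) (text_color : String) (highlight_color : String), Dom_colored_segments_py visible highlights text_color highlight_color → Spec_colored_segments_py visible highlights text_color highlight_color (colored_segments_py visible highlights text_color highlight_color)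

-- ===== LEMMAS AND PROOFS =====

-- index i is covered by highlight p (after clamping to [0, n))
def pvCovB (hl : List (Int × Int)) (n i : Nat) : Bool :=
  hl.any (fun p => decide (max 0 p.1 ≤ (i : Int) ∧ (i : Int) < min p.2 (n : Int)))

def pvColorAt (hl : List (Int × Int)) (n : Nat) (tc hc : String) (i : Nat) : String :=
  if pvCovB hl n i then hc else tc

-- exclusive prefix sum of the difference array
def pvPS (d : List Int) : Nat → Int
  | 0 => 0
  | i + 1 => pvPS d i + d.getD i 0

-- canonical grouping of a (char, color) sequence into maximal runs
def pvRunsPre : List Char → String → List (Char × String) → List (String × String)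
  | buf, cur, [] => [(String.ofList buf, cur)]
  | buf, cur, p :: rest =>
    if p.2 == cur then pvRunsPre (buf ++ [p.1]) cur rest
    else (String.ofList buf, cur) :: pvRunsPre [p.1] p.2 rest

def pvRuns : List (Char × String) → List (String × String)
  | [] => []
  | p :: rest => pvRunsPre [p.1] p.2 rest

-- pure grouping step (the segment-building part of pvBStep, without the depth counter)
def pvGStep (st : List (String × String) × List Char × String) (p : Char × String) :
    List (String × String) × List Char × String :=
  if p.2 ≠ st.2.2 ∧ st.2.1 ≠ [] then (st.1 ++ [(String.ofList st.2.1, st.2.2)], [p.1], p.2)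
  else (st.1, st.2.1 ++ [p.1], p.2)

theorem getD_set_eq {α : Type} [Inhabited α] (l : List α) (m k : Nat) (x d : α) :
    (l.set m x).getD k d = if m = k ∧ m < l.length then x else l.getD k d := by
  rw [List.getD_eq_getElem?_getD, List.getD_eq_getElem?_getD, List.getElem?_set]
  split_ifs with h1 h2 h3 h3 <;> simp_all <;> omega

theorem length_foldl_mark_range (hc : String) (l : List Int) (cs : List String) :
    (l.foldl (fun cs i => cs.set i.toNat hc) cs).length = cs.length := by
  induction l generalizing cs with
  | nil => rfl
  | cons x t ih => simp [List.foldl_cons, ih]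

theorem mark_seg (hc : String) (b : Int) :
    ∀ (a : Int), 0 ≤ a → ∀ (cs : List String), b ≤ (cs.length : Int) → ∀ (k : Nat),
    ((PySem.List.pyRange a b 1).foldl (fun cs i => cs.set i.toNat hc) cs).getD k "" =
      if a ≤ (k : Int) ∧ (k : Int) < b then hc else cs.getD k "" := by
  intro a
  induction hn : (b - a).toNat generalizing a with
  | zero =>
    intro ha cs hb k
    rw [PySem.List.pyRange_one_eq_nil (by omega)]
    rw [if_neg (by omega)]; rfl
  | succ m ih =>
    intro ha cs hb k
    rw [PySem.List.pyRange_one_cons (by omega), List.foldl_cons]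
    rw [ih (a+1) (by omega) (by omega) _ (by simpa using hb) k]
    rw [getD_set_eq]
    split_ifs <;> simp_all <;> omega

theorem length_pvMark (hc : String) (n : Int) (cs : List String) (p : Int × Int) :
    (pvMark hc n cs p).length = cs.length := length_foldl_mark_range hc _ cs

theorem getD_pvMark (hc : String) (n : Nat) (cs : List String) (p : Int × Int)
    (hlen : cs.length = n) (k : Nat) :
    (pvMark hc (n : Int) cs p).getD k "" =
      if max 0 p.1 ≤ (k : Int) ∧ (k : Int) < min p.2 (n : Int) then hc else cs.getD k "" := by
  unfold pvMark
  rw [mark_seg hc _ _ (by omega) cs (by omega) k]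

theorem getD_foldl_pvMark (hc : String) (n : Nat) (hl : List (Int × Int)) :
    ∀ (cs : List String), cs.length = n → ∀ (k : Nat),
    (hl.foldl (pvMark hc (n : Int)) cs).getD k "" =
      if pvCovB hl n k then hc else cs.getD k "" := by
  induction hl with
  | nil => intro cs _ k; simp [pvCovB]
  | cons p t ih =>
    intro cs hlen k
    rw [List.foldl_cons, ih _ (by rw [length_pvMark]; exact hlen) k, getD_pvMark hc n cs p hlen k]
    have hcons : pvCovB (p::t) n k = (decide (max 0 p.1 ≤ (k:Int) ∧ (k:Int) < min p.2 (n:Int)) || pvCovB t n k) := by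
      simp [pvCovB]
    rw [hcons]
    cases h1 : pvCovB t n k <;> cases h2 : decide (max 0 p.1 ≤ (k:Int) ∧ (k:Int) < min p.2 (n:Int)) <;> simp_all

theorem colorsA_eq (hl : List (Int × Int)) (n : Nat) (tc hc : String) :
    hl.foldl (pvMark hc (n : Int)) (List.replicate n tc) =
      (List.range n).map (pvColorAt hl n tc hc) := by
  apply List.ext_getElem
  · have hlen : ∀ (l : List (Int × Int)) (cs : List String), (l.foldl (pvMark hc (n:Int)) cs).length = cs.length := by
      intro l
      induction l with
      | nil => intro cs; rfl
      | cons q t ih => intro cs; rw [List.foldl_cons, ih, length_pvMark]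
    rw [hlen]; simp
  · intro k h1 h2
    rw [← List.getD_eq_getElem _ "" h1, ← List.getD_eq_getElem _ "" h2]
    rw [getD_foldl_pvMark hc n hl _ (by simp) k]
    simp only [List.length_map, List.length_range] at h2
    rw [List.getD_eq_getElem _ "" (by simp [h2])]
    simp [pvColorAt, h2]

theorem pvAInner_eq (nv : Nat) (colors : List String) (c : String) (j : Nat)
    (hlen : colors.length = nv) :
    pvAInner nv colors c j = j + ((colors.drop j).takeWhile (fun x => x == c)).length := by
  fun_induction pvAInner nv colors c j with
  | case1 j h ih =>
    rw [List.drop_eq_getElem_cons (by omega : j < colors.length)]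
    have hc : colors[j] = c := by
      have := h.2; rwa [PySem.List.pyGetD_natCast, List.getD_eq_getElem _ "" (by omega)] at this
    rw [List.takeWhile_cons, if_pos (by simp [hc])]
    simp only [List.length_cons]
    omega
  | case2 j h =>
    by_cases hj : j < colors.length
    · have hc : colors[j] ≠ c := by
        intro hh
        exact h ⟨by omega, by rw [PySem.List.pyGetD_natCast, List.getD_eq_getElem _ "" (by omega)]; exact hh⟩
      rw [List.drop_eq_getElem_cons hj, List.takeWhile_cons, if_neg (by simp [hc])]
      simp
    · rw [List.drop_eq_nil_of_le (by omega)]; simp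

theorem runsPre_closed (cur : String) :
    ∀ (rest : List (Char × String)) (buf : List Char),
    pvRunsPre buf cur rest =
      (String.ofList (buf ++ (rest.takeWhile (fun p => p.2 == cur)).map Prod.fst), cur) ::
        pvRuns (rest.dropWhile (fun p => p.2 == cur)) := by
  intro rest
  induction rest with
  | nil => intro buf; simp [pvRunsPre, pvRuns]
  | cons p r ih =>
    intro buf
    by_cases h : p.2 == cur
    · rw [pvRunsPre, if_pos h, ih]
      simp [List.dropWhile_cons, List.takeWhile_cons, h]
    · rw [pvRunsPre, if_neg h]
      simp [List.dropWhile_cons, List.takeWhile_cons, h, pvRuns]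

theorem zip_takeWhile_map_fst (cur : String) :
    ∀ (a : List Char) (b : List String),
    ((a.zip b).takeWhile (fun p => p.2 == cur)).map Prod.fst =
      a.take ((b.takeWhile (fun x => x == cur)).length) := by
  intro a
  induction a with
  | nil => intro b; simp
  | cons x a' ih =>
    intro b
    cases b with
    | nil => simp
    | cons y b' =>
      by_cases h : y == cur
      · simp [List.zip_cons_cons, List.takeWhile_cons, h, ih b']
      · simp [List.zip_cons_cons, List.takeWhile_cons, h]

theorem zip_dropWhile_snd (cur : String) :
    ∀ (a : List Char) (b : List String),
    (a.zip b).dropWhile (fun p => p.2 == cur) =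
      (a.drop ((b.takeWhile (fun x => x == cur)).length)).zip
        (b.drop ((b.takeWhile (fun x => x == cur)).length)) := by
  intro a
  induction a with
  | nil => intro b; simp
  | cons x a' ih =>
    intro b
    cases b with
    | nil => simp
    | cons y b' =>
      by_cases h : y == cur
      · simp [List.zip_cons_cons, List.dropWhile_cons, List.takeWhile_cons, h, ih b']
      · simp [List.zip_cons_cons, List.dropWhile_cons, List.takeWhile_cons, h]

theorem aOuter_eq (vs : List Char) (colors : List String) (hlen : vs.length = colors.length) :
    ∀ (i : Nat), pvAOuter vs colors i = pvRuns ((vs.zip colors).drop i) := by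
  intro i
  fun_induction pvAOuter vs colors i with
  | case2 i h =>
    rw [List.drop_eq_nil_of_le (by simp; omega)]
    rfl
  | case1 i h c j ih =>
    have hic : i < colors.length := by omega
    have hc : c = colors[i] := by
      simp only [c, PySem.List.pyGetD_natCast]
      exact List.getD_eq_getElem _ "" hic
    set k := ((colors.drop (i+1)).takeWhile (fun x => x == c)).length with hk
    have hj : j = i + 1 + k := by
      simp only [j]
      exact pvAInner_eq vs.length colors c (i+1) hlen.symm
    have hzipdrop : ∀ m : Nat, (vs.zip colors).drop m = (vs.drop m).zip (colors.drop m) := by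
      intro m; simp [List.zip, List.drop_zipWith]
    rw [hzipdrop i, List.drop_eq_getElem_cons h, List.drop_eq_getElem_cons hic,
      List.zip_cons_cons]
    show _ = pvRunsPre [vs[i]] colors[i] ((vs.drop (i+1)).zip (colors.drop (i+1)))
    rw [runsPre_closed]
    congr 1
    · congr 1
      · rw [PySem.List.slice_natCast]
        rw [zip_takeWhile_map_fst]
        rw [hj]
        have hkk : i + 1 + k - i = k + 1 := by omega
        rw [hkk]
        rw [List.drop_eq_getElem_cons h, List.take_succ_cons]
        rw [← hc]
        rfl
    · rw [ih, zip_dropWhile_snd, ← hc, hzipdrop j, hj]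
      simp only [List.drop_drop]
      rw [← hk]

-- ===== B-side lemmas =====

theorem pvPS_incAt (d : List Int) (k : Nat) (v : Int) (hk : k < d.length) :
    ∀ (i : Nat), pvPS (pvIncAt d k v) i = pvPS d i + (if k < i then v else 0) := by
  intro i
  induction i with
  | zero => simp [pvPS]
  | succ i ih =>
    simp only [pvPS, ih]
    unfold pvIncAt
    rw [getD_set_eq]
    by_cases h : k = i <;> split_ifs <;> simp_all <;> omega

theorem pvPS_replicate_zero (m : Nat) (i : Nat) : pvPS (List.replicate m (0 : Int)) i = 0 := by
  induction i with
  | zero => rfl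
  | succ i ih => simp [pvPS, ih, List.getD]

theorem pvPS_foldl_pvDiffOf (n : Nat) (hl : List (Int × Int)) :
    ∀ (d : List Int), d.length = n + 1 → ∀ (i : Nat), i < n →
    pvPS (hl.foldl (pvDiffOf (n : Int)) d) (i + 1) =
      pvPS d (i + 1) +
        (hl.countP (fun p => decide (max 0 p.1 ≤ (i : Int) ∧ (i : Int) < min p.2 (n : Int))) : Int) := by
  induction hl with
  | nil => intro d _ i _; simp [List.countP_nil]
  | cons p t ih =>
    intro d hd i hi
    rw [List.foldl_cons]
    have hlen2 : (pvDiffOf (n : Int) d p).length = n + 1 := by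
      unfold pvDiffOf pvIncAt; split <;> simp [hd]
    rw [ih _ hlen2 i hi]
    have hstep : pvPS (pvDiffOf (n : Int) d p) (i + 1) =
        pvPS d (i + 1) + (if max 0 p.1 ≤ (i : Int) ∧ (i : Int) < min p.2 (n : Int) then 1 else 0) := by
      unfold pvDiffOf
      by_cases hg : max 0 p.1 < min p.2 (n : Int)
      · rw [if_pos hg]
        have h1 : (min p.2 (n : Int)).toNat < (pvIncAt d (max 0 p.1).toNat 1).length := by
          simp only [pvIncAt, List.length_set, hd]; omega
        have h0 : (max 0 p.1).toNat < d.length := by rw [hd]; omega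
        rw [pvPS_incAt _ _ _ h1, pvPS_incAt _ _ _ h0]
        split_ifs <;> simp_all <;> omega
      · rw [if_neg hg, if_neg (by omega)]
        simp
    rw [hstep, List.countP_cons]
    by_cases h : max 0 p.1 ≤ (i : Int) ∧ (i : Int) < min p.2 (n : Int)
    · rw [if_pos h, if_pos (by simpa using h)]; push_cast; ring
    · rw [if_neg h, if_neg (by simpa using h)]; push_cast; ring

theorem color_of_depth (hl : List (Int × Int)) (n : Nat) (tc hc : String) (i : Nat) (hi : i < n) :
    (if 0 < pvPS (hl.foldl (pvDiffOf (n : Int)) (List.replicate (n + 1) (0 : Int))) (i + 1)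
      then hc else tc) = pvColorAt hl n tc hc i := by
  rw [pvPS_foldl_pvDiffOf n hl _ (by simp) i hi, pvPS_replicate_zero]
  simp only [zero_add]
  unfold pvColorAt pvCovB
  by_cases h : hl.any (fun p => decide (max 0 p.1 ≤ (i : Int) ∧ (i : Int) < min p.2 (n : Int)))
  · have h1 : 0 < hl.countP (fun p => decide (max 0 p.1 ≤ (i : Int) ∧ (i : Int) < min p.2 (n : Int))) := by
      rw [List.countP_pos_iff]
      simpa [List.any_eq_true] using h
    rw [if_pos h, if_pos (by exact_mod_cast h1)]
  · have h0 : hl.countP (fun p => decide (max 0 p.1 ≤ (i : Int) ∧ (i : Int) < min p.2 (n : Int))) = 0 := by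
      rw [List.countP_eq_zero]
      intro p hp hdp
      exact h (List.any_eq_true.mpr ⟨p, hp, hdp⟩)
    have h1 : ((hl.countP (fun p => decide (max 0 p.1 ≤ (i : Int) ∧ (i : Int) < min p.2 (n : Int))) : Nat) : Int) = 0 := by
      exact_mod_cast h0
    rw [if_neg h, if_neg (by rw [h1]; exact lt_irrefl 0)]

theorem gfold_runsPre :
    ∀ (pairs : List (Char × String)) (segs : List (String × String)) (buf : List Char) (cur : String),
    buf ≠ [] →
    (pairs.foldl pvGStep (segs, buf, cur)).1 ++
        [(String.ofList (pairs.foldl pvGStep (segs, buf, cur)).2.1,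
          (pairs.foldl pvGStep (segs, buf, cur)).2.2)] =
      segs ++ pvRunsPre buf cur pairs := by
  intro pairs
  induction pairs with
  | nil => intro segs buf cur _; simp [pvRunsPre]
  | cons p rest ih =>
    intro segs buf cur hbuf
    rw [List.foldl_cons]
    by_cases h : p.2 = cur
    · have hstep : pvGStep (segs, buf, cur) p = (segs, buf ++ [p.1], p.2) := by
        unfold pvGStep; rw [if_neg (by simp [h])]
      rw [hstep, ih _ _ _ (by simp), pvRunsPre, if_pos (by simp [h]), h]
    · have hstep : pvGStep (segs, buf, cur) p = (segs ++ [(String.ofList buf, cur)], [p.1], p.2) := by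
        unfold pvGStep; rw [if_pos ⟨h, hbuf⟩]
      rw [hstep, ih _ _ _ (by simp), pvRunsPre, if_neg (by simp [h])]
      simp

theorem bfold_eq (D : List Int) (tc hc : String) (n : Nat) (f : Nat → String)
    (hf : ∀ i, i < n → (if 0 < pvPS D (i + 1) then hc else tc) = f i) :
    ∀ (l : List Char) (i : Nat), i + l.length ≤ n →
    ∀ (segs : List (String × String)) (buf : List Char) (cur : String),
    (PySem.List.enumerate l (i : Int)).foldl (pvBStep D tc hc) (segs, pvPS D i, buf, cur) =
      (((l.zip ((List.range' i l.length).map f)).foldl pvGStep (segs, buf, cur)).1,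
        pvPS D (i + l.length),
        ((l.zip ((List.range' i l.length).map f)).foldl pvGStep (segs, buf, cur)).2.1,
        ((l.zip ((List.range' i l.length).map f)).foldl pvGStep (segs, buf, cur)).2.2) := by
  intro l
  induction l with
  | nil => intro i _ segs buf cur; simp [PySem.List.enumerate]
  | cons ch rest ih =>
    intro i hle segs buf cur
    rw [PySem.List.enumerate_cons, List.foldl_cons]
    have hin : i < n := by simp at hle; omega
    have hstep : pvBStep D tc hc (segs, pvPS D i, buf, cur) ((i : Int), ch) =
        (if f i ≠ cur ∧ buf ≠ [] then (segs ++ [(String.ofList buf, cur)], pvPS D (i+1), [ch], f i)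
         else (segs, pvPS D (i+1), buf ++ [ch], f i)) := by
      unfold pvBStep
      simp only [PySem.List.pyGetD_natCast]
      have hdep : pvPS D i + D.getD i 0 = pvPS D (i + 1) := by simp [pvPS]
      rw [hdep, hf i hin]
    rw [hstep]
    by_cases hbr : f i ≠ cur ∧ buf ≠ []
    · rw [if_pos hbr]
      have hcast : ((i : Int) + 1) = ((i + 1 : Nat) : Int) := by push_cast; ring
      rw [hcast, ih (i+1) (by simp at hle ⊢; omega)]
      simp only [List.length_cons]
      rw [List.range'_succ, List.map_cons, List.zip_cons_cons, List.foldl_cons]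
      have hg : pvGStep (segs, buf, cur) (ch, f i) = (segs ++ [(String.ofList buf, cur)], [ch], f i) := by
        unfold pvGStep; rw [if_pos hbr]
      rw [hg]
      simp [Nat.add_comm, Nat.add_assoc, Nat.add_left_comm]
    · rw [if_neg hbr]
      have hcast : ((i : Int) + 1) = ((i + 1 : Nat) : Int) := by push_cast; ring
      rw [hcast, ih (i+1) (by simp at hle ⊢; omega)]
      simp only [List.length_cons]
      rw [List.range'_succ, List.map_cons, List.zip_cons_cons, List.foldl_cons]
      have hg : pvGStep (segs, buf, cur) (ch, f i) = (segs, buf ++ [ch], f i) := by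
        unfold pvGStep; rw [if_neg hbr]
      rw [hg]
      simp [Nat.add_comm, Nat.add_assoc, Nat.add_left_comm]

theorem runsPre_const (c : String) :
    ∀ (rest : List (Char × String)) (buf : List Char), (∀ p ∈ rest, p.2 = c) →
    pvRunsPre buf c rest = [(String.ofList (buf ++ rest.map Prod.fst), c)] := by
  intro rest
  induction rest with
  | nil => intro buf _; simp [pvRunsPre]
  | cons p r ih =>
    intro buf hall
    rw [pvRunsPre, if_pos (by simp [hall p (by simp)])]
    rw [ih _ (fun q hq => hall q (by simp [hq]))]
    simp

theorem alt_core (vsl : List Char) (hl : List (Int × Int)) (tc hc : String) (hne : vsl ≠ []) :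
    (((PySem.List.enumerate vsl 0).foldl
        (pvBStep (hl.foldl (pvDiffOf (vsl.length : Int)) (List.replicate (vsl.length + 1) (0 : Int))) tc hc)
        ([], 0, [], tc)).1 ++
      [(String.ofList ((PySem.List.enumerate vsl 0).foldl
        (pvBStep (hl.foldl (pvDiffOf (vsl.length : Int)) (List.replicate (vsl.length + 1) (0 : Int))) tc hc)
        ([], 0, [], tc)).2.2.1,
        ((PySem.List.enumerate vsl 0).foldl
        (pvBStep (hl.foldl (pvDiffOf (vsl.length : Int)) (List.replicate (vsl.length + 1) (0 : Int))) tc hc)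
        ([], 0, [], tc)).2.2.2)]) =
      pvRuns (vsl.zip ((List.range vsl.length).map (pvColorAt hl vsl.length tc hc))) := by
  obtain ⟨ch, rest, rfl⟩ := List.exists_cons_of_ne_nil hne
  set n := (ch :: rest).length with hn
  set D := hl.foldl (pvDiffOf (n : Int)) (List.replicate (n + 1) (0 : Int)) with hD
  set f : Nat → String := pvColorAt hl n tc hc with hfdef
  have hf : ∀ i, i < n → (if 0 < pvPS D (i + 1) then hc else tc) = f i :=
    fun i hi => color_of_depth hl n tc hc i hi
  rw [PySem.List.enumerate_cons, List.foldl_cons]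
  have hstep0 : pvBStep D tc hc ([], 0, [], tc) ((0 : Int), ch) = ([], pvPS D 1, [ch], f 0) := by
    unfold pvBStep
    rw [if_neg (by simp)]
    have hg : (0 : Int) + PySem.List.pyGetD D 0 0 = pvPS D 1 := by
      rw [PySem.List.pyGetD_zero]; simp [pvPS]
    simp only [hg, List.nil_append]
    rw [show (if pvPS D 1 > 0 then hc else tc) = f 0 from hf 0 (by simp [hn])]
  rw [hstep0]
  have h1cast : (0 : Int) + 1 = ((1 : Nat) : Int) := by norm_num
  have hps1 : pvPS D 1 = pvPS D (1 : Nat) := rfl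
  rw [h1cast, hps1, bfold_eq D tc hc n f hf rest 1 (by simp only [hn, List.length_cons]; omega)]
  rw [gfold_runsPre _ [] [ch] (f 0) (by simp)]
  rw [List.nil_append]
  have hrange : List.range n = 0 :: List.range' 1 rest.length := by
    rw [List.range_eq_range', hn]
    simp only [List.length_cons]
    rw [List.range'_succ]
  rw [hrange, List.map_cons, List.zip_cons_cons]
  rfl

theorem alt_eq_runs (visible : String) (hl : List (Int × Int)) (tc hc : String)
    (hv : visible ≠ "") :
    colored_segments_py_alt visible hl tc hc =
      pvRuns (visible.toList.zip ((List.range visible.toList.length).map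
        (pvColorAt hl visible.toList.length tc hc))) := by
  unfold colored_segments_py_alt
  rw [if_neg hv]
  exact alt_core visible.toList hl tc hc (by
    intro h; exact hv (by rwa [← String.toList_eq_nil_iff]))

theorem a_eq_runs (visible : String) (hl : List (Int × Int)) (tc hc : String)
    (hv : visible ≠ "") (hh : hl ≠ []) :
    colored_segments_py visible hl tc hc =
      pvRuns (visible.toList.zip ((List.range visible.toList.length).map
        (pvColorAt hl visible.toList.length tc hc))) := by
  unfold colored_segments_py
  rw [if_neg (by simp [hv, hh])]
  rw [colorsA_eq hl visible.toList.length tc hc]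
  rw [aOuter_eq _ _ (by simp) 0]
  rfl

-- ===== VERDICT (by name: the statement is the Claim_ definition above) =====
theorem colored_segments_py_spec : Claim_equal_colored_segments_py := by
  intro visible highlights tc hc _
  unfold Spec_colored_segments_py
  by_cases hv : visible = ""
  · subst hv; simp [colored_segments_py, colored_segments_py_alt]
  · by_cases hh : highlights = []
    · subst hh
      rw [alt_eq_runs visible [] tc hc hv]
      simp only [colored_segments_py]
      rw [if_pos (Or.inl trivial)]
      have hvl : visible.toList ≠ [] := by
        intro h; exact hv (by rwa [← String.toList_eq_nil_iff])
      obtain ⟨ch, rest, hcons⟩ := List.exists_cons_of_ne_nil hvl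
      rw [hcons]
      have hcol : pvColorAt [] (ch :: rest).length tc hc = fun _ => tc := by
        funext i; simp [pvColorAt, pvCovB]
      rw [hcol]
      have hrange : List.range (ch :: rest).length = 0 :: List.range' 1 rest.length := by
        rw [List.range_eq_range']
        simp only [List.length_cons]
        rw [List.range'_succ]
      rw [hrange, List.map_cons, List.zip_cons_cons]
      show [(visible, tc)] = pvRuns ((ch, tc) :: rest.zip ((List.range' 1 rest.length).map fun _ => tc))
      rw [pvRuns]
      rw [runsPre_const tc _ _ (by
        intro p hp
        have := (List.of_mem_zip hp).2
        simp only [List.mem_map] at this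
        obtain ⟨x, _, hx⟩ := this
        exact hx.symm)]
      rw [List.map_fst_zip (by simp)]
      have : String.ofList ([ch] ++ rest) = visible := by
        rw [show [ch] ++ rest = visible.toList from hcons ▸ rfl]
        exact String.ofList_toList
      rw [this]
    · rw [a_eq_runs visible highlights tc hc hv hh, alt_eq_runs visible highlights tc hc hv]
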